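-- pv_equiv track=rewrite | github.com/MtszSid/UniRep | Wstep do programowania Python/lista 3/3_2.py | licz
-- ===== SOURCE A (Python) =====
-- def licz(liczby, n, hiper):
--     for i in range(1, n//10**len(str(hiper))):
--         g=str(i)+str(hiper)
--         if (len(g)<len(str(n))-1):
--             for j in range(0, n//hiper):
--                 g=str(i)+str(hiper)
--                 while (len(str(n))-1-len(g)-len(str(j))>0):
--                     g+='0'
--                 if(len(g)+len(str(j))<=(len(str(n))-1)):
--                     w=g
--                     w+=str(j)
--                     liczby.append(int(w))
--
--         else:
--             liczby.append(int(g))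
--     return liczby
-- ===== SOURCE B (Python) =====
-- def licz(liczby, n, hiper):
--     k = len(str(hiper))
--     L = len(str(n))
--     for i in range(1, n // 10**k):
--         li = len(str(i))
--         if li + k < L - 1:
--             d = L - 1 - li - k          # digits available after the prefix i||hiper
--             m = n // hiper
--             cap = 10**d
--             cnt = m if m < cap else cap
--             base = (i * 10**k + hiper) * cap
--             liczby.extend(base + j for j in range(cnt))
--         else:
--             liczby.append(i * 10**k + hiper)
--     return liczby
-- ===== Notes on version B (the rewrite author's own statement) =====
-- stated objective: alternative
-- what changed: B computes each padded concatenation arithmetically as (i*10^k+hiper)*10^d + j and iterates j only up to min(n//hiper, 10^d) (the first j whose decimal width no longer fits), instead of A's per-j string building, zero-padding while-loop, length tests and int() parsing over the whole range(n//hiper).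
import Mathlib
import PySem

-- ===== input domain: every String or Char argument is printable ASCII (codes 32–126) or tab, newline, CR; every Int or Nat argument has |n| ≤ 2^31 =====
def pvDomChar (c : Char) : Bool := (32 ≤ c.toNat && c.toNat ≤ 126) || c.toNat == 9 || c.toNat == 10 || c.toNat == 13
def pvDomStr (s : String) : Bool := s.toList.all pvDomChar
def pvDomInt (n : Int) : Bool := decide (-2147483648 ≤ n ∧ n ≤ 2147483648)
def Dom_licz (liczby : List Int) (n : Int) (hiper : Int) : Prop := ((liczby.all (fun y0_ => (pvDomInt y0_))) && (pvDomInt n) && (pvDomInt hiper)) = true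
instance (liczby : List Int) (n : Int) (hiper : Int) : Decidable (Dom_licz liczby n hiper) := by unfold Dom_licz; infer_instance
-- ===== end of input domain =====

-- B replaces A's per-candidate string building, zero-padding and int() parsing by direct
-- arithmetic, and caps the inner loop at the first j whose decimal width no longer fits.
-- Python A and B both mutate and return `liczby`; the theorems below are about the return value.

-- ===== PORT A =====
-- hand port of Python's int(w): inside Pre_licz every string A passes to int() is a nonempty
-- all-ASCII-digit string, and on exactly those strings int() is this left fold (exact there)
def pvIntOfDigits (cs : List Char) : Int :=
  cs.foldl (fun a c => 10 * a + ((c.toNat : Int) - 48)) 0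

-- A's `while (len(str(n))-1-len(g)-len(str(j))>0): g+='0'` padding loop, step for step
def pvPad (L lj : Int) (g : List Char) : List Char :=
  if L - 1 - (g.length : Int) - lj > 0 then pvPad L lj (g ++ ['0']) else g
termination_by (L - 1 - lj - (g.length : Int)).toNat
decreasing_by simp only [List.length_append, List.length_cons, List.length_nil]; omega

def licz (liczby : List Int) (n : Int) (hiper : Int) : List Int :=
  (PySem.List.pyRange 1 (PySem.Int.floordiv n (10 ^ (PySem.Int.toChars hiper).length)) 1).foldl
    (fun acc i =>
      let g := PySem.Int.toChars i ++ PySem.Int.toChars hiper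
      if (g.length : Int) < ((PySem.Int.toChars n).length : Int) - 1 then
        (PySem.List.pyRange 0 (PySem.Int.floordiv n hiper) 1).foldl
          (fun acc2 j =>
            let g2 := pvPad ((PySem.Int.toChars n).length : Int)
                        ((PySem.Int.toChars j).length : Int)
                        (PySem.Int.toChars i ++ PySem.Int.toChars hiper)
            if (g2.length : Int) + ((PySem.Int.toChars j).length : Int)
                ≤ ((PySem.Int.toChars n).length : Int) - 1 then
              acc2 ++ [pvIntOfDigits (g2 ++ PySem.Int.toChars j)]
            else acc2) acc
      else acc ++ [pvIntOfDigits g]) liczby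

-- ===== PORT B =====
def licz_alt (liczby : List Int) (n : Int) (hiper : Int) : List Int :=
  let k := (PySem.Int.toChars hiper).length
  let L : Int := ((PySem.Int.toChars n).length : Int)
  (PySem.List.pyRange 1 (PySem.Int.floordiv n (10 ^ k)) 1).foldl
    (fun acc i =>
      let li : Int := ((PySem.Int.toChars i).length : Int)
      if li + (k : Int) < L - 1 then
        let d := L - 1 - li - (k : Int)
        let m := PySem.Int.floordiv n hiper
        let cap : Int := 10 ^ d.toNat
        let cnt := if m < cap then m else cap
        let base := (i * 10 ^ k + hiper) * cap
        acc ++ (PySem.List.pyRange 0 cnt 1).map (fun j => base + j)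
      else acc ++ [i * 10 ^ k + hiper]) liczby

-- ===== PRECONDITION & SPEC =====
-- Pre_ excludes exactly the inputs on which Python A raises: hiper = 0 reached by the inner loop
-- (ZeroDivisionError from n//hiper) and hiper < 0 reached by int() on a string with an inner '-'
-- (ValueError); on every input admitted here A returns normally.
def Pre_licz (liczby : List Int) (n : Int) (hiper : Int) : Prop :=
  0 < hiper
  ∨ PySem.Int.floordiv n (10 ^ (PySem.Int.toChars hiper).length) ≤ 1
  ∨ (hiper = 0 ∧ n < 1000)
  ∨ (hiper < 0 ∧
      ((PySem.Int.toChars (PySem.Int.floordiv n (10 ^ (PySem.Int.toChars hiper).length) - 1)).length : Int)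
        + ((PySem.Int.toChars hiper).length : Int) < ((PySem.Int.toChars n).length : Int) - 1)
instance (liczby : List Int) (n : Int) (hiper : Int) : Decidable (Pre_licz liczby n hiper) := by
  unfold Pre_licz; infer_instance

def pvWitness_licz : List Int × Int × Int := ([], 2000, 7)

def Spec_licz (liczby : List Int) (n : Int) (hiper : Int) (out : List Int) : Prop :=
  out = licz_alt liczby n hiper
instance (liczby : List Int) (n : Int) (hiper : Int) (out : List Int) : Decidable (Spec_licz liczby n hiper out) := by
  unfold Spec_licz; infer_instance

-- ===== CLAIM (what is proved, stated in full; the proofs are below) =====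
def Claim_equal_licz : Prop := ∀ (liczby : List Int) (n : Int) (hiper : Int),
  Dom_licz liczby n hiper → Pre_licz liczby n hiper → Spec_licz liczby n hiper (licz liczby n hiper)

-- ===== LEMMAS AND PROOFS =====

-- proof-side mirror of Nat.toDigits 10: decimal digits, most significant first
def pvNatDigits (m : Nat) : List Char :=
  if m < 10 then [Nat.digitChar m]
  else pvNatDigits (m / 10) ++ [Nat.digitChar (m % 10)]
termination_by m
decreasing_by omega

theorem pvPad_eq (L lj : Int) (g : List Char) :
    pvPad L lj g = g ++ List.replicate (L - 1 - lj - (g.length : Int)).toNat '0' := by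
  fun_induction pvPad with
  | case1 g h ih =>
      rw [ih]
      simp only [List.append_assoc, List.length_append, List.length_cons, List.length_nil,
        List.singleton_append]
      congr 1
      rw [← List.replicate_succ]
      congr 1
      omega
  | case2 g h =>
      have : (L - 1 - lj - (g.length : Int)).toNat = 0 := by omega
      simp [this]

theorem pvToDigitsCore_eq (f : Nat) : ∀ (m : Nat) (l : List Char), m < f →
    Nat.toDigitsCore 10 f m l = pvNatDigits m ++ l := by
  induction f with
  | zero => intro m l h; omega
  | succ f ih =>
      intro m l h
      rw [Nat.toDigitsCore]
      by_cases h10 : m < 10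
      · have : m / 10 = 0 := by omega
        simp only [this]
        conv_rhs => rw [pvNatDigits, if_pos h10]
        have : m % 10 = m := by omega
        simp [this]
      · have hne : ¬ (m / 10 = 0) := by omega
        simp only [if_neg hne]
        rw [ih (m / 10) _ (by omega)]
        conv_rhs => rw [pvNatDigits, if_neg h10]
        simp

theorem pvToChars_eq (m : Int) (h : 0 ≤ m) : PySem.Int.toChars m = pvNatDigits m.toNat := by
  rw [PySem.Int.toChars, if_neg (by omega)]
  rw [Nat.toDigits, pvToDigitsCore_eq (m.toNat + 1) m.toNat [] (by omega)]
  simp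

theorem pvNatDigits_ne_nil (m : Nat) : pvNatDigits m ≠ [] := by
  rw [pvNatDigits]
  split <;> simp

theorem pvDigitChar_toNat (m : Nat) (h : m < 10) : ((Nat.digitChar m).toNat : Int) = 48 + m := by
  interval_cases m <;> decide

theorem pvFold_digits (m : Nat) (a : Int) :
    (pvNatDigits m).foldl (fun a c => 10 * a + ((c.toNat : Int) - 48)) a
      = a * 10 ^ (pvNatDigits m).length + m := by
  fun_induction pvNatDigits generalizing a with
  | case1 m h =>
      simp only [List.foldl_cons, List.foldl_nil, List.length_singleton, pow_one]
      rw [pvDigitChar_toNat m h]; ring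
  | case2 m h ih =>
      rw [List.foldl_append, List.length_append, ih]
      simp only [List.foldl_cons, List.foldl_nil, List.length_singleton]
      rw [pvDigitChar_toNat (m % 10) (by omega)]
      have h1 : (m : Int) = 10 * (m / 10 : Nat) + ((m % 10 : Nat) : Int) := by
        push_cast; omega
      rw [pow_add, pow_one]
      rw [h1]; ring

theorem pvFold_zeros (p : Nat) (a : Int) :
    (List.replicate p '0').foldl (fun a c => 10 * a + ((c.toNat : Int) - 48)) a = a * 10 ^ p := by
  induction p generalizing a with
  | zero => simp
  | succ p ih =>
      rw [List.replicate_succ, List.foldl_cons, ih]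
      have : (('0'.toNat : Int) - 48) = 0 := by decide
      rw [this, pow_succ]; ring

theorem pvLt_pow_len (m : Nat) : m < 10 ^ (pvNatDigits m).length := by
  fun_induction pvNatDigits with
  | case1 m h => simpa using h
  | case2 m h ih =>
      rw [List.length_append]
      simp only [List.length_singleton]
      rw [pow_add, pow_one]
      omega

theorem pvPow_pred_le (m : Nat) (h : 1 ≤ m) : 10 ^ ((pvNatDigits m).length - 1) ≤ m := by
  fun_induction pvNatDigits with
  | case1 m h10 => simpa using h
  | case2 m h10 ih =>
      have hne := pvNatDigits_ne_nil (m / 10)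
      have hlen : 1 ≤ (pvNatDigits (m / 10)).length := List.length_pos_iff.mpr hne
      have ih' := ih (by omega)
      rw [List.length_append]
      simp only [List.length_singleton]
      have : (pvNatDigits (m / 10)).length + 1 - 1 = ((pvNatDigits (m / 10)).length - 1) + 1 := by omega
      rw [this, pow_succ]
      omega

theorem pvLen_le_iff (m d : Nat) (hd : 1 ≤ d) : (pvNatDigits m).length ≤ d ↔ m < 10 ^ d := by
  constructor
  · intro h
    calc m < 10 ^ (pvNatDigits m).length := pvLt_pow_len m
    _ ≤ 10 ^ d := Nat.pow_le_pow_right (by omega) h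
  · intro h
    by_contra hc
    rcases Nat.eq_zero_or_pos m with hm | hm
    · subst hm
      have : pvNatDigits 0 = ['0'] := by rw [pvNatDigits]; norm_num [Nat.digitChar]
      rw [this] at hc; simp at hc; omega
    · have h1 := pvPow_pred_le m hm
      have h2 : 10 ^ d ≤ 10 ^ ((pvNatDigits m).length - 1) :=
        Nat.pow_le_pow_right (by omega) (by omega)
      omega

theorem pvLen_mono (a b : Nat) (h : a ≤ b) : (pvNatDigits a).length ≤ (pvNatDigits b).length := by
  have hb : 1 ≤ (pvNatDigits b).length := List.length_pos_iff.mpr (pvNatDigits_ne_nil b)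
  rw [pvLen_le_iff a _ hb]
  calc a ≤ b := h
  _ < 10 ^ (pvNatDigits b).length := pvLt_pow_len b

theorem pvFilter_range_nat (N : Nat) (cap : Int) :
    (PySem.List.pyRange 0 N 1).filter (fun j => decide (j < cap))
      = PySem.List.pyRange 0 (min (N : Int) cap) 1 := by
  induction N with
  | zero => simp [PySem.List.pyRange_one_eq_nil (by omega : min (0:Int) cap ≤ 0),
      PySem.List.pyRange_one_eq_nil (by omega : (0:Int) ≤ 0)]
  | succ N ih =>
      have hcast : ((N + 1 : Nat) : Int) = (N : Int) + 1 := by push_cast; ring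
      rw [hcast, PySem.List.pyRange_one_succ_right (by positivity), List.filter_append, ih]
      by_cases h : (N : Int) < cap
      · have h1 : min ((N : Int) + 1) cap = (N : Int) + 1 := by omega
        have h2 : min (N : Int) cap = (N : Int) := by omega
        rw [h1, h2, PySem.List.pyRange_one_succ_right (by positivity)]
        simp [h]
      · have h1 : min ((N : Int) + 1) cap = min (N : Int) cap := by omega
        rw [h1]
        simp [h]

theorem pvFilter_range (m cap : Int) :
    (PySem.List.pyRange 0 m 1).filter (fun j => decide (j < cap))
      = PySem.List.pyRange 0 (min m cap) 1 := by
  rcases (by omega : m ≤ 0 ∨ 0 < m) with hm | hm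
  · rw [PySem.List.pyRange_one_eq_nil hm, PySem.List.pyRange_one_eq_nil (by omega : min m cap ≤ 0)]
    rfl
  · have : m = (m.toNat : Int) := by omega
    rw [this, pvFilter_range_nat]

theorem pvMain (liczby : List Int) (n : Int) (hiper : Int)
    (hpre : Pre_licz liczby n hiper) : licz liczby n hiper = licz_alt liczby n hiper := by
  unfold licz licz_alt
  apply PySem.List.foldl_congr_mem
  intro acc i hi
  simp only []
  rw [PySem.List.mem_pyRange_one] at hi
  obtain ⟨hi1, hiT⟩ := hi
  set K := (PySem.Int.toChars hiper).length with hK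
  set L : Int := ((PySem.Int.toChars n).length : Int) with hL
  set T := PySem.Int.floordiv n (10 ^ K) with hT
  have hT2 : 2 ≤ T := by omega
  have hb : (0:Int) < 10 ^ K := by positivity
  have hn : 0 < n := by
    have := (PySem.Int.le_floordiv_iff_mul_le (a := n) (b := (10:Int) ^ K) (q := 2) hb).mp hT2
    nlinarith
  set li : Int := ((PySem.Int.toChars i).length : Int) with hli
  have hlen_app : (((PySem.Int.toChars i ++ PySem.Int.toChars hiper).length : Nat) : Int) = li + (K : Int) := by
    simp [List.length_append, hli, hK]
  have hval_pos : ∀ (x : Int), 0 ≤ x →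
      pvIntOfDigits (PySem.Int.toChars i ++ PySem.Int.toChars x) = i * 10 ^ (PySem.Int.toChars x).length + x := by
    intro x hx
    rw [pvToChars_eq i (by omega), pvToChars_eq x hx, pvIntOfDigits, List.foldl_append,
      pvFold_digits, pvFold_digits]
    have hxc : ((x.toNat : Nat) : Int) = x := by omega
    have hic : ((i.toNat : Nat) : Int) = i := by omega
    rw [hxc, hic]
    rw [← pvToChars_eq x hx]
    ring
  by_cases hc : li + (K : Int) < L - 1
  · -- "if" branch in both programs
    rw [if_pos (by rw [hlen_app]; exact hc), if_pos hc]
    set d : Int := L - 1 - li - (K : Int) with hd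
    have hd1 : 1 ≤ d := by omega
    set cap : Int := (10:Int) ^ d.toNat with hcap
    have hcap0 : (0:Int) < cap := by positivity
    set m := PySem.Int.floordiv n hiper with hm
    rcases hpre with hpos | hsmall | ⟨hz, hn1000⟩ | ⟨hneg, hbound⟩
    · -- hiper > 0 : the real computation
      set base : Int := (i * 10 ^ K + hiper) * cap with hbase
      have hbody : ∀ acc2 : List Int, ∀ j ∈ PySem.List.pyRange 0 m 1,
          (fun acc2 j =>
            let g2 := pvPad L ((PySem.Int.toChars j).length : Int)
                        (PySem.Int.toChars i ++ PySem.Int.toChars hiper)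
            if (g2.length : Int) + ((PySem.Int.toChars j).length : Int) ≤ L - 1 then
              acc2 ++ [pvIntOfDigits (g2 ++ PySem.Int.toChars j)]
            else acc2) acc2 j
          = (fun acc2 j => if (decide (j < cap)) = true then acc2 ++ [base + j] else acc2) acc2 j := by
        intro acc2 j hj
        rw [PySem.List.mem_pyRange_one] at hj
        obtain ⟨hj0, hjm⟩ := hj
        simp only []
        set lj : Int := ((PySem.Int.toChars j).length : Int) with hlj
        rw [pvPad_eq]
        have hp : (L - 1 - lj - (((PySem.Int.toChars i ++ PySem.Int.toChars hiper).length : Nat) : Int)).toNat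
            = (d - lj).toNat := by rw [hlen_app]; omega
        rw [hp]
        have hljn : lj = (((PySem.Int.toChars j).length : Nat) : Int) := rfl
        have hlj0 : 0 ≤ lj := by rw [hljn]; positivity
        -- the kept j are exactly those with lj ≤ d, i.e. j < cap
        have hiff : lj ≤ d ↔ j < cap := by
          have h1 : (pvNatDigits j.toNat).length ≤ d.toNat ↔ j.toNat < 10 ^ d.toNat :=
            pvLen_le_iff j.toNat d.toNat (by omega)
          have h2 : lj = ((pvNatDigits j.toNat).length : Int) := by
            rw [hljn, pvToChars_eq j hj0]
          have h3 : cap = ((10 ^ d.toNat : Nat) : Int) := by rw [hcap]; push_cast; ring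
          omega
        have hcond : ((((PySem.Int.toChars i ++ PySem.Int.toChars hiper)
              ++ List.replicate (d - lj).toNat '0').length : Nat) : Int) + lj ≤ L - 1 ↔ lj ≤ d := by
          simp only [List.length_append, List.length_replicate]
          push_cast
          omega
        by_cases hle : lj ≤ d
        · rw [if_pos (hcond.mpr hle), if_pos (by simp [hiff.mp hle])]
          congr 1
          congr 1
          -- value of the padded concatenation
          rw [List.append_assoc, pvIntOfDigits, List.foldl_append, ← pvIntOfDigits]
          rw [hval_pos hiper (le_of_lt hpos)]
          rw [List.foldl_append, pvFold_zeros, pvToChars_eq j hj0, pvFold_digits]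
          have hjc : ((j.toNat : Nat) : Int) = j := by omega
          rw [hjc, hbase, hcap]
          have h2 : lj = ((pvNatDigits j.toNat).length : Int) := by
            rw [hljn, pvToChars_eq j hj0]
          have hexp : (d - lj).toNat + (pvNatDigits j.toNat).length = d.toNat := by omega
          rw [mul_assoc, ← pow_add, hexp]
        · rw [if_neg (fun hx => hle (hcond.mp hx)), if_neg (by simp only [decide_eq_true_eq]; exact fun hx => hle (hiff.mpr hx))]
      rw [PySem.List.foldl_congr_mem _ _ _ _ hbody, PySem.List.foldl_append_if]
      rw [pvFilter_range m cap]
      have : (if m < cap then m else cap) = min m cap := by split <;> omega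
      rw [this]
    · rw [← hK] at hsmall; omega
    · -- hiper = 0 ∧ n < 1000 : the "if" branch is unreachable
      exfalso
      have hK1 : K = 1 := by rw [hK, hz]; decide
      have hL3 : L ≤ 3 := by
        have h1 : (pvNatDigits n.toNat).length ≤ 3 := by
          rw [pvLen_le_iff n.toNat 3 (by omega)]; omega
        rw [hL, pvToChars_eq n (by omega)]
        omega
      have hli1 : 1 ≤ li := by
        rw [hli, pvToChars_eq i (by omega)]
        have := List.length_pos_iff.mpr (pvNatDigits_ne_nil i.toNat)
        omega
      omega
    · -- hiper < 0 : the inner loop is empty on both sides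
      have hmneg : m < 0 := by
        have h0 := PySem.Int.floordiv_mul_add_mod n hiper
        have hb2 := PySem.Int.mod_neg_bounds (a := n) hneg
        by_contra hq
        have hq' : 0 ≤ m := by omega
        nlinarith
      rw [PySem.List.pyRange_one_eq_nil (le_of_lt hmneg), if_pos (show m < cap by omega),
        PySem.List.pyRange_one_eq_nil (le_of_lt hmneg)]
      simp
  · -- "else" branch in both programs
    rw [if_neg (by rw [hlen_app]; exact hc), if_neg hc]
    have hh : 0 ≤ hiper := by
      rcases hpre with hpos | hsmall | ⟨hz, _⟩ | ⟨hneg, hbound⟩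
      · omega
      · rw [← hK] at hsmall; omega
      · omega
      · exfalso
        rw [← hK, ← hT] at hbound
        have h1 : li ≤ ((PySem.Int.toChars (T - 1)).length : Int) := by
          rw [hli, pvToChars_eq i (by omega), pvToChars_eq (T - 1) (by omega)]
          have := pvLen_mono i.toNat (T - 1).toNat (by omega)
          omega
        omega
    rw [hval_pos hiper hh]

-- ===== VERDICT (by name: the statement is the Claim_ definition above) =====
theorem licz_spec : Claim_equal_licz := by
  intro liczby n hiper _ hpre
  unfold Spec_licz
  exact pvMain liczby n hiper hpre
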